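-- pv_equiv track=rewrite | github.com/saitamashigoto/algo | jim-and-jokes.py | solve
-- ===== SOURCE A (Python) =====
-- def solve(dates):
--     events = {}
--     for m, d in dates:
--         try:
--             base10 = int(str(d), m)
--             events.setdefault(base10, []).append((m, d))
--         except:
--             pass
--     ans = 0
--     for key, eve in events.items():
--         if len(eve) >=2:
--             ans += binomialCoefficient(len(eve), 2)
--     return ans
--
-- def binomialCoefficient(n, k):
--     if(k > n - k):
--         k = n - k
--     res = 1
--     for i in range(k):
--         res = res * (n - i)
--         res = res // (i + 1)
--     return res
-- ===== SOURCE B (Python) =====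
-- def solve(dates):
--     ans = 0
--     counts = {}
--     for m, d in dates:
--         try:
--             base10 = int(str(d), m)
--         except:
--             continue
--         seen = counts.get(base10, 0)
--         ans += seen
--         counts[base10] = seen + 1
--     return ans
-- ===== Notes on version B (the rewrite author's own statement) =====
-- stated objective: simpler
-- what changed: B drops A's dict of per-value group lists, its second pass over the groups and the binomialCoefficient helper, counting pairs in a single pass by adding, for each converted date, the number of equal values already seen.
import Mathlib
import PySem

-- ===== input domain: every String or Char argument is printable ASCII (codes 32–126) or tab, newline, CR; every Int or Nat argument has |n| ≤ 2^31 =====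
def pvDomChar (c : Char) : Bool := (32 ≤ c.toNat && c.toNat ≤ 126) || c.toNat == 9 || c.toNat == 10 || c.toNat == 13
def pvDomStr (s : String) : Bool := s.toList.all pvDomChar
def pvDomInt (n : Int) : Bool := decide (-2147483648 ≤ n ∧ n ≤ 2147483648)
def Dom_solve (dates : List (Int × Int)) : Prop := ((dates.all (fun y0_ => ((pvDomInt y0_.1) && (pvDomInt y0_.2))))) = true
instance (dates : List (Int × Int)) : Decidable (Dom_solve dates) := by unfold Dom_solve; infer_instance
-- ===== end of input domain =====

-- B replaces A's group-lists dict + second pass with binomial coefficients by a single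
-- counting pass that adds, for each successfully converted date, the number of equal
-- values seen so far (objective: simpler).

-- ===== PORT A =====
-- int(str(d), m); the bare `except: pass` of A = the `none` branch of the step functions
def pvConv (p : Int × Int) : Option Int :=
  PySem.Int.ofStrBase? (PySem.Int.toStr p.2) p.1

def binomialCoefficient (n k : Int) : Int :=
  let k := if k > n - k then n - k else k
  (PySem.List.pyRange 0 k 1).foldl (fun res i => PySem.Int.floordiv (res * (n - i)) (i + 1)) 1

-- loop body of A's first loop: events.setdefault(base10, []).append((m, d))
def pvStepA (ev : PySem.Dict Int (List (Int × Int))) (p : Int × Int) :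
    PySem.Dict Int (List (Int × Int)) :=
  match pvConv p with
  | some b => ev.modify b [] (· ++ [p])
  | none => ev

-- A's second loop over events.items()
def pvFinishA (ev : PySem.Dict Int (List (Int × Int))) : Int :=
  ev.items.foldl
    (fun ans kv => if kv.2.length ≥ 2 then ans + binomialCoefficient (kv.2.length : Int) 2 else ans) 0

def solve (dates : List (Int × Int)) : Int :=
  pvFinishA (dates.foldl pvStepA PySem.Dict.empty)

-- ===== PORT B =====
-- loop body of B: ans += counts.get(base10, 0); counts[base10] = seen + 1
def pvStepB (st : Int × PySem.Dict Int Int) (p : Int × Int) : Int × PySem.Dict Int Int :=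
  match pvConv p with
  | some b => (st.1 + st.2.getD b 0, st.2.insert b (st.2.getD b 0 + 1))
  | none => st

def solve_alt (dates : List (Int × Int)) : Int :=
  (dates.foldl pvStepB (0, PySem.Dict.empty)).1

-- ===== PRECONDITION & SPEC =====
def Spec_solve (dates : List (Int × Int)) (out : Int) : Prop := out = solve_alt dates
instance (dates : List (Int × Int)) (out : Int) : Decidable (Spec_solve dates out) := by unfold Spec_solve; infer_instance

-- ===== CLAIM (what is proved, stated in full; the proofs are below) =====
def Claim_equal_solve : Prop := ∀ (dates : List (Int × Int)), Dom_solve dates → Spec_solve dates (solve dates)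

-- ===== LEMMAS AND PROOFS =====

-- contribution of one group of size n to A's answer
def pvG (n : Nat) : Int := if 2 ≤ n then binomialCoefficient (n : Int) 2 else 0

theorem binomEval (m : Int) (hm : 2 ≤ m) : binomialCoefficient m 2 = (m * (m - 1)) / 2 := by
  by_cases h2 : m = 2
  · subst h2; decide
  by_cases h3 : m = 3
  · subst h3; decide
  -- m ≥ 4 : k stays 2, range = [0, 1]
  have hk : ¬ ((2 : Int) > m - 2) := by omega
  simp only [binomialCoefficient, if_neg hk]
  have : PySem.List.pyRange 0 2 1 = [0, 1] := by decide
  rw [this]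
  simp only [List.foldl]
  rw [PySem.Int.floordiv_eq_ediv_of_pos (by norm_num : (0:Int) < 0 + 1),
      PySem.Int.floordiv_eq_ediv_of_pos (by norm_num : (0:Int) < 1 + 1)]
  have h1 : 1 * (m - 0) / (0 + 1) = m := by omega
  rw [h1]
  norm_num

theorem pvG_succ (n : Nat) : pvG (n + 1) = pvG n + n := by
  by_cases h1 : 2 ≤ n
  · have h2 : 2 ≤ n + 1 := by omega
    simp only [pvG, if_pos h1, if_pos h2]
    rw [binomEval _ (by push_cast; omega), binomEval _ (by push_cast; omega)]
    push_cast
    have ha : ((n : Int) + 1) * ((n : Int) + 1 - 1) = (n : Int) * ((n : Int) - 1) + 2 * (n : Int) := by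
      ring
    rw [ha]
    generalize (n : Int) * ((n : Int) - 1) = a
    omega
  · have hn : n < 2 := by omega
    interval_cases n <;> decide

-- A's second loop, as a sum of per-group contributions
theorem foldl_if_sum (l : List (Int × List (Int × Int))) (s : Int) :
    l.foldl (fun ans kv => if kv.2.length ≥ 2 then ans + binomialCoefficient (kv.2.length : Int) 2 else ans) s
      = s + (l.map (fun kv => pvG kv.2.length)).sum := by
  induction l generalizing s with
  | nil => simp
  | cons kv l ih =>
    simp only [List.foldl, List.map, List.sum_cons]
    rw [ih]
    by_cases h : kv.2.length ≥ 2
    · simp only [pvG, if_pos h]; ring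
    · simp only [pvG, if_neg h]; ring

theorem finishA_eq (ev : PySem.Dict Int (List (Int × Int))) (hnd : ev.keys.Nodup) :
    pvFinishA ev = (ev.keys.map (fun k => pvG (ev.getD k []).length)).sum := by
  unfold pvFinishA
  rw [foldl_if_sum, PySem.Dict.items_eq_map_keys ev hnd [], List.map_map]
  simp [Function.comp_def]

-- replacing the value at one key of a Nodup key list changes the sum by the difference there
theorem sum_update (ks : List Int) (F F' : Int → Int) (b : Int) (hnd : ks.Nodup)
    (hb : b ∈ ks) (hne : ∀ k, k ≠ b → F' k = F k) :
    (ks.map F').sum = (ks.map F).sum + (F' b - F b) := by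
  induction ks with
  | nil => cases hb
  | cons x ks ih =>
    simp only [List.map, List.sum_cons]
    rcases List.mem_cons.mp hb with rfl | hb'
    · have : ∀ k ∈ ks, F' k = F k := by
        intro k hk
        exact hne k (fun h => (List.nodup_cons.mp hnd).1 (h ▸ hk))
      rw [List.map_congr_left this]
      ring
    · have hx : F' x = F x := hne x (fun h => (List.nodup_cons.mp hnd).1 (h ▸ hb'))
      rw [hx, ih (List.nodup_cons.mp hnd).2 hb']
      ring

theorem main_invariant (l : List (Int × Int)) :
    ∀ (ev : PySem.Dict Int (List (Int × Int))) (ans : Int) (cnt : PySem.Dict Int Int),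
    ev.keys.Nodup →
    (∀ k, cnt.getD k 0 = ((ev.getD k []).length : Int)) →
    (l.foldl pvStepB (ans, cnt)).1 = ans + pvFinishA (l.foldl pvStepA ev) - pvFinishA ev := by
  induction l with
  | nil => intro ev ans cnt _ _; simp
  | cons p l ih =>
    intro ev ans cnt hnd hrel
    simp only [List.foldl]
    cases hc : pvConv p with
    | none =>
      rw [show pvStepB (ans, cnt) p = (ans, cnt) from by simp [pvStepB, hc],
          show pvStepA ev p = ev from by simp [pvStepA, hc]]
      exact ih ev ans cnt hnd hrel
    | some b =>
      rw [show pvStepB (ans, cnt) p = (ans + cnt.getD b 0, cnt.insert b (cnt.getD b 0 + 1)) from by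
            simp [pvStepB, hc],
          show pvStepA ev p = ev.modify b [] (· ++ [p]) from by simp [pvStepA, hc]]
      set ev' := ev.modify b [] (· ++ [p]) with hev'
      have hkeys : ev'.keys = (ev.insert b ((ev.getD b []) ++ [p])).keys :=
        PySem.Dict.keys_modify ev b [] _
      have hnd' : ev'.keys.Nodup := by
        rw [hkeys]; exact PySem.Dict.nodup_keys_insert ev b _ hnd
      have hgetD : ∀ k, ev'.getD k [] = if k = b then ev.getD b [] ++ [p] else ev.getD k [] := by
        intro k; exact PySem.Dict.getD_modify ev b k [] _
      have hrel' : ∀ k, (cnt.insert b (cnt.getD b 0 + 1)).getD k 0 = ((ev'.getD k []).length : Int) := by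
        intro k
        rw [PySem.Dict.getD_insert, hgetD k]
        by_cases hk : k = b
        · simp [hk, hrel b]
        · simp [hk, hrel k]
      rw [ih ev' (ans + cnt.getD b 0) _ hnd' hrel']
      have hfin : pvFinishA ev' = pvFinishA ev + cnt.getD b 0 := by
        rw [finishA_eq ev hnd, finishA_eq ev' hnd', hrel b]
        by_cases hmem : b ∈ ev.keys
        · have hkeq : ev'.keys = ev.keys := by
            rw [hkeys, PySem.Dict.keys_insert_of_contains ev _
              ((PySem.Dict.contains_iff_mem_keys ev b).mpr hmem)]
          rw [hkeq]
          rw [sum_update ev.keys (fun k => pvG (ev.getD k []).length)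
              (fun k => pvG (ev'.getD k []).length) b hnd hmem
              (by intro k hk; simp [hgetD k, hk])]
          have : (ev'.getD b []).length = (ev.getD b []).length + 1 := by
            simp [hgetD b]
          rw [this, pvG_succ]
          push_cast; ring
        · have hkeq : ev'.keys = ev.keys ++ [b] := by
            rw [hkeys, PySem.Dict.keys_insert_of_not_contains ev _
              (by rw [← Bool.not_eq_true, PySem.Dict.contains_iff_mem_keys]; exact hmem)]
          have hb0 : ev.getD b [] = [] := PySem.Dict.getD_of_not_contains ev []
            (by rw [← Bool.not_eq_true, PySem.Dict.contains_iff_mem_keys]; exact hmem)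
          have hmap : List.map (fun k => pvG (ev'.getD k []).length) ev.keys
              = List.map (fun k => pvG (ev.getD k []).length) ev.keys := by
            apply List.map_congr_left
            intro k hk
            have : k ≠ b := fun h => hmem (h ▸ hk)
            simp [hgetD k, this]
          rw [hkeq, List.map_append, List.sum_append, hmap]
          simp [hgetD b, hb0, pvG]
      rw [hfin]; ring

theorem solve_eq_alt (dates : List (Int × Int)) : solve dates = solve_alt dates := by
  unfold solve solve_alt
  rw [main_invariant dates PySem.Dict.empty 0 PySem.Dict.empty
    PySem.Dict.nodup_keys_empty (by intro k; simp [PySem.Dict.getD_empty])]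
  have : pvFinishA (PySem.Dict.empty) = 0 := by rfl
  rw [this]; ring

-- ===== VERDICT (by name: the statement is the Claim_ definition above) =====
theorem solve_spec : Claim_equal_solve := by
  intro dates _
  unfold Spec_solve
  exact solve_eq_alt dates
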